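-- pv_equiv track=rewrite | github.com/bmcage/centrifuge-1d | centrifuge1d/modules/shared/show.py | order_figures
-- ===== SOURCE A (Python) =====
-- FIG_OPTIONS_DEFAULTS = {'show': True, 'legend_loc': 4, 'order': 999,
--                         'show_legend': True, 'overlay_color': 'blue',
--                         'overlay_x': None, 'overlay_y': None,
--                         'overlay_alpha': 0.2}
--
-- FIGURES_PAIRS = (('h', 'u'), ('MI', 'MO'), ('GC', 'RM'), ('K', 'K_u'),
--                  ('gF_MT', 'gF_MO'), ('dgF_MT', 'dgF_MO'), ('s1', 's2'),
--                  ('theta', 'relsat'))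
--
-- def get_figure_option(figstyles, fig_id, name, not_found=None):
--     fig_style = figstyles[fig_id]
--
--     if name in fig_style:
--         value = fig_style[name]
--     elif name in FIG_OPTIONS_DEFAULTS:
--         value = FIG_OPTIONS_DEFAULTS[name]
--     else:
--         value = not_found
--
--     return value
--
-- def order_figures(figures_styles, figs_ids):
--     """
--       Sort figures identified by 'figs_ids' according to their 'order'
--       value. Pairs defined by FIGURES_PAIRS take precedence.
--     """
--
--     ordered_figures = []
--
--     if not figs_ids:
--         return ordered_figures
--
--     figs_order = {fig_id: get_figure_option(figures_styles, fig_id, 'order')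
--                    for fig_id in figs_ids}
--
--     for (id1, id2) in FIGURES_PAIRS:
--         if (id1 in figs_order) and (id2 in figs_order):
--             ordered_figures.append(id1)
--             ordered_figures.append(id2)
--
--             del figs_order[id1]
--             del figs_order[id2]
--
--     ordered_figures.extend(list(sorted(figs_order, key=figs_order.__getitem__)))
--
--     return ordered_figures
-- ===== SOURCE B (Python) =====
-- FIG_OPTIONS_DEFAULTS = {'show': True, 'legend_loc': 4, 'order': 999,
--                         'show_legend': True, 'overlay_color': 'blue',
--                         'overlay_x': None, 'overlay_y': None,
--                         'overlay_alpha': 0.2}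
--
-- FIGURES_PAIRS = (('h', 'u'), ('MI', 'MO'), ('GC', 'RM'), ('K', 'K_u'),
--                  ('gF_MT', 'gF_MO'), ('dgF_MT', 'dgF_MO'), ('s1', 's2'),
--                  ('theta', 'relsat'))
--
-- def get_figure_option(figstyles, fig_id, name, not_found=None):
--     fig_style = figstyles[fig_id]
--
--     if name in fig_style:
--         value = fig_style[name]
--     elif name in FIG_OPTIONS_DEFAULTS:
--         value = FIG_OPTIONS_DEFAULTS[name]
--     else:
--         value = not_found
--
--     return value
--
-- def order_figures(figures_styles, figs_ids):
--     """One global sort: paired ids get key (0, pair_rank, 0), the rest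
--     (1, order, original position); no pair-emission loop, no second sort."""
--     if not figs_ids:
--         return []
--
--     figs_order = {fid: get_figure_option(figures_styles, fid, 'order')
--                   for fid in figs_ids}
--
--     rank = {}
--     for i, (id1, id2) in enumerate(FIGURES_PAIRS):
--         if id1 in figs_order and id2 in figs_order:
--             rank[id1] = 2 * i
--             rank[id2] = 2 * i + 1
--
--     def key(item):
--         idx, fid = item
--         if fid in rank:
--             return (0, rank[fid], 0)
--         return (1, figs_order[fid], idx)
--
--     return [fid for _, fid in sorted(enumerate(figs_order), key=key)]
-- ===== Notes on version B (the rewrite author's own statement) =====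
-- stated objective: alternative
-- what changed: A emits matched FIGURES_PAIRS into the output while deleting them from the dict and then sorts the remainder; B never deletes anything and performs one global sort of all (deduplicated) ids under a composite key (0, pair_rank, 0) for paired ids and (1, order, original position) for the rest.
import Mathlib
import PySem

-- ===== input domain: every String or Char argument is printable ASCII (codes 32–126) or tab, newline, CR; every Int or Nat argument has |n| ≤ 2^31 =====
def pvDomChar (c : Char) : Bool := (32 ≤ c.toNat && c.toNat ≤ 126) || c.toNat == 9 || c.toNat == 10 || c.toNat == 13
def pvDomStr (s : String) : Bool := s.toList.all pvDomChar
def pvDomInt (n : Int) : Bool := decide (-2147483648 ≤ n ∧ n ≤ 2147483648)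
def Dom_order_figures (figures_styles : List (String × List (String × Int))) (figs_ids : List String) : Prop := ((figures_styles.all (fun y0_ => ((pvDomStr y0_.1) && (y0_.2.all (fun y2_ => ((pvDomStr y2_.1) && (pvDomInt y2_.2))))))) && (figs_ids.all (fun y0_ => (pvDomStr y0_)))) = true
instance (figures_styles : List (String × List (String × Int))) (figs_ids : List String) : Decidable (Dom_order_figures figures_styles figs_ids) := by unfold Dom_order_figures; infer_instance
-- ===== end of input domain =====

-- B replaces A's pair-emission loop + separate remainder sort by ONE global sort under a composite key (alternative decomposition, same cost).
-- ===== PORT A =====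
def FIGURES_PAIRS : List (String × String) :=
  [("h","u"),("MI","MO"),("GC","RM"),("K","K_u"),
   ("gF_MT","gF_MO"),("dgF_MT","dgF_MO"),("s1","s2"),("theta","relsat")]

-- FIG_OPTIONS_DEFAULTS lookup, modelled only for int-valued entries; exact for the only name order_figures uses, "order" (value 999).
def FIG_OPTIONS_DEFAULTS_get? (name : String) : Option Int :=
  if name == "order" then some 999 else none

-- none = Python KeyError on figstyles[fig_id] (excluded by Pre_); for name = "order" the not_found=None branch is unreachable.
def get_figure_option (figstyles : List (String × List (String × Int))) (fig_id : String) (name : String) : Option Int :=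
  match (PySem.Dict.mk figstyles).get? fig_id with
  | none => none
  | some fig_style =>
    match (PySem.Dict.mk fig_style).get? name with
    | some v => some v
    | none => FIG_OPTIONS_DEFAULTS_get? name

def order_figures (figures_styles : List (String × List (String × Int))) (figs_ids : List String) : List String :=
  if figs_ids = [] then [] else
  let figs_order : PySem.Dict String Int :=
    figs_ids.foldl (fun d fid => d.insert fid ((get_figure_option figures_styles fid "order").getD 0)) ⟨[]⟩
  let st := FIGURES_PAIRS.foldl
    (fun (st : List String × PySem.Dict String Int) p =>
      if (st.2.get? p.1).isSome && (st.2.get? p.2).isSome then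
        (st.1 ++ [p.1, p.2], (st.2.erase p.1).erase p.2)
      else st) ([], figs_order)
  st.1 ++ PySem.List.sorted st.2.keys (fun k => st.2.getD k 0) false

-- ===== PORT B =====
def order_figures_alt (figures_styles : List (String × List (String × Int))) (figs_ids : List String) : List String :=
  if figs_ids = [] then [] else
  let figs_order : PySem.Dict String Int :=
    figs_ids.foldl (fun d fid => d.insert fid ((get_figure_option figures_styles fid "order").getD 0)) ⟨[]⟩
  let rank : PySem.Dict String Int :=
    (PySem.List.enumerate FIGURES_PAIRS 0).foldl
      (fun r ip =>
        if (figs_order.get? ip.2.1).isSome && (figs_order.get? ip.2.2).isSome then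
          (r.insert ip.2.1 (2 * ip.1)).insert ip.2.2 (2 * ip.1 + 1)
        else r) ⟨[]⟩
  let key : Int × String → Lex (Int × Lex (Int × Int)) := fun item =>
    match rank.get? item.2 with
    | some rk => toLex (0, toLex (rk, 0))
    | none => toLex (1, toLex (figs_order.getD item.2 0, item.1))
  (PySem.List.sorted (PySem.List.enumerate figs_order.keys 0) key false).map (·.2)

-- ===== PRECONDITION & SPEC =====
-- Pre_ excludes exactly the inputs where Python A raises KeyError: some requested figure id has no entry in figures_styles (B raises there too).
def Pre_order_figures (figures_styles : List (String × List (String × Int))) (figs_ids : List String) : Prop :=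
  ∀ fid ∈ figs_ids, fid ∈ figures_styles.map Prod.fst
instance (figures_styles : List (String × List (String × Int))) (figs_ids : List String) : Decidable (Pre_order_figures figures_styles figs_ids) := by unfold Pre_order_figures; infer_instance

def pvWitness_order_figures : (List (String × List (String × Int))) × List String :=
  ([("h", [("order", 1)]), ("u", []), ("z", [("order", -2)])], ["u", "z", "h"])

def Spec_order_figures (figures_styles : List (String × List (String × Int))) (figs_ids : List String) (out : List String) : Prop := out = order_figures_alt figures_styles figs_ids
instance (figures_styles : List (String × List (String × Int))) (figs_ids : List String) (out : List String) : Decidable (Spec_order_figures figures_styles figs_ids out) := by unfold Spec_order_figures; infer_instance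

-- ===== CLAIM (what is proved, stated in full; the proofs are below) =====
def Claim_equal_order_figures : Prop := ∀ (figures_styles : List (String × List (String × Int))) (figs_ids : List String), Dom_order_figures figures_styles figs_ids → Pre_order_figures figures_styles figs_ids → Spec_order_figures figures_styles figs_ids (order_figures figures_styles figs_ids)

-- ===== LEMMAS AND PROOFS =====
lemma pvGet?_filter (l : List (String × Int)) (q : String × Int → Bool) (x : String)
    (h : ∀ kv : String × Int, kv.1 = x → q kv = true) :
    PySem.Dict.get? ⟨l.filter q⟩ x = PySem.Dict.get? ⟨l⟩ x := by
  induction l with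
  | nil => rfl
  | cons kv t ih =>
    by_cases hk : kv.1 = x
    · simp [PySem.Dict.get?, List.filter_cons, h kv hk, List.find?, hk]
    · have hk' : (kv.1 == x) = false := by simpa using hk
      by_cases hq : q kv = true
      · simpa [PySem.Dict.get?, List.filter_cons, hq, List.find?, hk'] using ih
      · simpa [PySem.Dict.get?, List.filter_cons, hq, List.find?, hk'] using ih

lemma pvMapFst_filter (l : List (String × Int)) (p : String → Bool) :
    (l.filter (fun kv => p kv.1)).map Prod.fst = (l.map Prod.fst).filter p := by
  induction l with
  | nil => rfl
  | cons kv t ih =>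
    by_cases hp : p kv.1 = true <;> simp [List.filter_cons, hp, ih]

def pvIdx (dd : List String) (fid : String) : Int := (((PySem.List.index? dd fid).getD 0 : Nat) : Int)

lemma pvEnum_eq_map (dd : List String) (hnd : dd.Nodup) :
    PySem.List.enumerate dd 0 = dd.map (fun fid => (pvIdx dd fid, fid)) := by
  apply List.ext_getElem
  · simp [PySem.List.length_enumerate]
  · intro k h1 h2
    rw [PySem.List.getElem_enumerate]
    have hk : k < dd.length := by simpa using h2
    have hmem : dd[k] ∈ dd := List.getElem_mem _
    have hsome : (PySem.List.index? dd dd[k]).isSome := by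
      rw [PySem.List.index?_isSome_iff]; exact hmem
    obtain ⟨j, hj⟩ := Option.isSome_iff_exists.mp hsome
    obtain ⟨hjlt, hget, _⟩ := PySem.List.getElem_of_index?_eq_some hj
    have : j = k := by
      have := List.Nodup.getElem_inj_iff hnd (i := j) (j := k) (hi := hjlt) (hj := hk)
      exact this.mp hget
    have hj' : List.idxOf? dd[k] dd = some j := by simpa using hj
    simp [pvIdx, hj']
    omega

def pvCond (d : PySem.Dict String Int) (p : String × String) : Bool :=
  (d.get? p.1).isSome && (d.get? p.2).isSome

def pvEm (d : PySem.Dict String Int) (P : List (String × String)) : List String :=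
  P.flatMap (fun p => if pvCond d p then [p.1, p.2] else [])

def pvEmR (d : PySem.Dict String Int) (l : List (Int × (String × String))) : List (String × Int) :=
  l.flatMap (fun ip => if pvCond d ip.2 then [(ip.2.1, 2 * ip.1), (ip.2.2, 2 * ip.1 + 1)] else [])

def pvIds (P : List (String × String)) : List String := P.flatMap (fun p => [p.1, p.2])

lemma pvEm_sublist (d : PySem.Dict String Int) (P : List (String × String)) :
    (pvEm d P).Sublist (pvIds P) := by
  induction P with
  | nil => simp [pvEm, pvIds]
  | cons p t ih =>
    simp only [pvEm, pvIds, List.flatMap_cons] at *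
    refine List.Sublist.append ?_ ih
    by_cases hc : pvCond d p = true <;> simp [hc]

lemma pvMem_pvEm (d : PySem.Dict String Int) (P : List (String × String)) (x : String)
    (hx : x ∈ pvEm d P) : (d.get? x).isSome := by
  simp only [pvEm, List.mem_flatMap] at hx
  obtain ⟨p, _, hxp⟩ := hx
  by_cases hc : pvCond d p = true
  · rw [if_pos hc] at hxp
    simp only [List.mem_cons, List.not_mem_nil, or_false] at hxp
    have h1 := (Bool.and_eq_true _ _).mp hc
    rcases hxp with h | h
    · simpa [h] using h1.1
    · simpa [h] using h1.2
  · simp [if_neg hc] at hxp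

lemma pvEmR_map_fst (d : PySem.Dict String Int) (l : List (Int × (String × String))) :
    (pvEmR d l).map Prod.fst = pvEm d (l.map (·.2)) := by
  induction l with
  | nil => simp [pvEmR, pvEm]
  | cons ip t ih =>
    simp only [pvEmR, pvEm, List.flatMap_cons, List.map_cons, List.map_append] at *
    rw [ih]
    by_cases hc : pvCond d ip.2 = true <;> simp [hc]

lemma pvMem_pvEmR (d : PySem.Dict String Int) (l : List (Int × (String × String)))
    (pr : String × Int) (h : pr ∈ pvEmR d l) :
    ∃ ip ∈ l, pr.2 = 2 * ip.1 ∨ pr.2 = 2 * ip.1 + 1 := by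
  simp only [pvEmR, List.mem_flatMap] at h
  obtain ⟨ip, hip, hpr⟩ := h
  refine ⟨ip, hip, ?_⟩
  by_cases hc : pvCond d ip.2 = true
  · rw [if_pos hc] at hpr
    simp only [List.mem_cons, List.not_mem_nil, or_false] at hpr
    rcases hpr with h | h <;> simp [h]
  · simp [if_neg hc] at hpr

lemma pvEmR_pairwise (d : PySem.Dict String Int) (l : List (Int × (String × String)))
    (hl : l.Pairwise (fun a b => a.1 < b.1)) :
    (pvEmR d l).Pairwise (fun a b => a.2 < b.2) := by
  induction l with
  | nil => simp [pvEmR]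
  | cons ip t ih =>
    rw [List.pairwise_cons] at hl
    simp only [pvEmR, List.flatMap_cons]
    rw [List.pairwise_append]
    refine ⟨?_, ih hl.2, ?_⟩
    · by_cases hc : pvCond d ip.2 = true <;> simp [hc] <;> omega
    · intro a ha b hb
      obtain ⟨jp, hjp, hj⟩ := pvMem_pvEmR d t b hb
      have hlt : ip.1 < jp.1 := hl.1 jp hjp
      have ha' : a.2 = 2 * ip.1 ∨ a.2 = 2 * ip.1 + 1 := by
        by_cases hc : pvCond d ip.2 = true
        · rw [if_pos hc] at ha
          simp only [List.mem_cons, List.not_mem_nil, or_false] at ha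
          rcases ha with h | h <;> simp [h]
        · simp [if_neg hc] at ha
      rcases ha' with h | h <;> rcases hj with h2 | h2 <;> omega

def pvStep (st : List String × PySem.Dict String Int) (p : String × String) :
    List String × PySem.Dict String Int :=
  if (st.2.get? p.1).isSome && (st.2.get? p.2).isSome then
    (st.1 ++ [p.1, p.2], (st.2.erase p.1).erase p.2)
  else st

lemma pvPairLoop (d0 : PySem.Dict String Int) (P : List (String × String))
    (acc : List String) (d : PySem.Dict String Int)
    (hP : (pvIds P).Nodup)
    (hag : ∀ x ∈ pvIds P, d.get? x = d0.get? x) :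
    P.foldl pvStep (acc, d) =
      (acc ++ pvEm d0 P, ⟨d.items.filter (fun kv => !(pvEm d0 P).contains kv.1)⟩) := by
  induction P generalizing acc d with
  | nil =>
    simp only [List.foldl_nil, pvEm, pvIds, List.flatMap_nil, List.append_nil]
    refine Prod.ext rfl ?_
    show d = PySem.Dict.mk _
    have he : (fun kv : String × Int => !(List.contains ([] : List String) kv.1)) = fun _ => true := by
      funext kv; rfl
    rw [he, List.filter_true]
  | cons p t ih =>
    have hmem1 : p.1 ∈ pvIds (p :: t) := by simp [pvIds]
    have hmem2 : p.2 ∈ pvIds (p :: t) := by simp [pvIds]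
    have hcond : pvCond d p = pvCond d0 p := by
      unfold pvCond; rw [hag p.1 hmem1, hag p.2 hmem2]
    have hPsplit := List.nodup_append.mp (by simpa only [pvIds, List.flatMap_cons] using hP :
      ([p.1, p.2] ++ t.flatMap (fun p => [p.1, p.2])).Nodup)
    have hP' : (pvIds t).Nodup := hPsplit.2.1
    have hno1 : p.1 ∉ pvIds t := fun hx => hPsplit.2.2 p.1 (by simp) p.1 hx rfl
    have hno2 : p.2 ∉ pvIds t := fun hx => hPsplit.2.2 p.2 (by simp) p.2 hx rfl
    have hmemt : ∀ x ∈ pvIds t, x ∈ pvIds (p :: t) := by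
      intro x hx
      simp only [pvIds, List.flatMap_cons]
      exact List.mem_append_right _ hx
    rw [List.foldl_cons]
    by_cases hc : pvCond d0 p = true
    · have hbc : ((d.get? p.1).isSome && (d.get? p.2).isSome) = true := by
        rw [show ((d.get? p.1).isSome && (d.get? p.2).isSome) = pvCond d p from rfl, hcond]; exact hc
      have hstep : pvStep (acc, d) p = (acc ++ [p.1, p.2], (d.erase p.1).erase p.2) := by
        unfold pvStep; simp [hbc]
      rw [hstep]
      have hag' : ∀ x ∈ pvIds t, ((d.erase p.1).erase p.2).get? x = d0.get? x := by
        intro x hx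
        have hx1 : x ≠ p.1 := fun h => hno1 (h ▸ hx)
        have hx2 : x ≠ p.2 := fun h => hno2 (h ▸ hx)
        have e2 : ((d.erase p.1).erase p.2).get? x = (d.erase p.1).get? x :=
          pvGet?_filter _ _ _ (fun kv hkv => by simp [hkv, hx2])
        have e1 : (d.erase p.1).get? x = d.get? x :=
          pvGet?_filter _ _ _ (fun kv hkv => by simp [hkv, hx1])
        rw [e2, e1]; exact hag x (hmemt x hx)
      rw [ih (acc ++ [p.1, p.2]) ((d.erase p.1).erase p.2) hP' hag']
      have hema : pvEm d0 (p :: t) = p.1 :: p.2 :: pvEm d0 t := by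
        simp [pvEm, List.flatMap_cons, hc]
      refine Prod.ext (by simp [hema]) ?_
      show PySem.Dict.mk _ = PySem.Dict.mk _
      congr 1
      simp only [PySem.Dict.erase, List.filter_filter]
      rw [hema]
      apply List.filter_congr
      intro kv _
      by_cases h1 : kv.1 = p.1 <;> by_cases h2 : kv.1 = p.2 <;>
        by_cases h3 : kv.1 ∈ pvEm d0 t <;>
        simp [List.contains_cons, h1, h2, h3]
    · have hbc : ((d.get? p.1).isSome && (d.get? p.2).isSome) = false := by
        rw [show ((d.get? p.1).isSome && (d.get? p.2).isSome) = pvCond d p from rfl, hcond]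
        exact Bool.eq_false_iff.mpr hc
      have hstep : pvStep (acc, d) p = (acc, d) := by
        unfold pvStep; simp [hbc]
      rw [hstep]
      rw [ih acc d hP' (fun x hx => hag x (hmemt x hx))]
      have hema : pvEm d0 (p :: t) = pvEm d0 t := by
        simp [pvEm, List.flatMap_cons, Bool.eq_false_iff.mpr hc]
      rw [hema]

lemma pvRankLoop (d0 : PySem.Dict String Int) (l : List (Int × (String × String)))
    (r : PySem.Dict String Int)
    (hnd : (pvIds (l.map (·.2))).Nodup)
    (hfresh : ∀ x ∈ pvIds (l.map (·.2)), r.contains x = false) :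
    (l.foldl (fun r ip => if pvCond d0 ip.2 then (r.insert ip.2.1 (2 * ip.1)).insert ip.2.2 (2 * ip.1 + 1) else r) r).items
      = r.items ++ pvEmR d0 l := by
  induction l generalizing r with
  | nil => simp [pvEmR]
  | cons ip t ih =>
    have hsplit := List.nodup_append.mp (by simpa only [List.map_cons, pvIds, List.flatMap_cons] using hnd :
      ([ip.2.1, ip.2.2] ++ (t.map (·.2)).flatMap (fun p => [p.1, p.2])).Nodup)
    have hab : ip.2.1 ≠ ip.2.2 := by
      have := hsplit.1
      simp at this
      exact this
    have hmem1 : ip.2.1 ∈ pvIds ((ip :: t).map (·.2)) := by simp [pvIds]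
    have hmem2 : ip.2.2 ∈ pvIds ((ip :: t).map (·.2)) := by simp [pvIds]
    have hmemt : ∀ x ∈ pvIds (t.map (·.2)), x ∈ pvIds ((ip :: t).map (·.2)) := by
      intro x hx
      simp only [List.map_cons, pvIds, List.flatMap_cons]
      exact List.mem_append_right _ hx
    rw [List.foldl_cons]
    by_cases hc : pvCond d0 ip.2 = true
    · rw [if_pos hc]
      have hf1 : r.contains ip.2.1 = false := hfresh _ hmem1
      have hf2 : (r.insert ip.2.1 (2 * ip.1)).contains ip.2.2 = false := by
        rw [PySem.Dict.contains_insert]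
        simp [hab.symm, hfresh _ hmem2]
      have hfresh' : ∀ x ∈ pvIds (t.map (·.2)),
          ((r.insert ip.2.1 (2 * ip.1)).insert ip.2.2 (2 * ip.1 + 1)).contains x = false := by
        intro x hx
        have hx1 : x ≠ ip.2.1 := fun h =>
          hsplit.2.2 ip.2.1 (by simp) x hx (by rw [h])
        have hx2 : x ≠ ip.2.2 := fun h =>
          hsplit.2.2 ip.2.2 (by simp) x hx (by rw [h])
        rw [PySem.Dict.contains_insert, PySem.Dict.contains_insert]
        simp [hx1, hx2, hfresh _ (hmemt x hx)]
      rw [ih _ hsplit.2.1 hfresh']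
      rw [PySem.Dict.items_insert_of_not_contains _ _ hf2,
          PySem.Dict.items_insert_of_not_contains _ _ hf1]
      simp [pvEmR, List.flatMap_cons, hc]
    · rw [if_neg hc]
      rw [ih _ hsplit.2.1 (fun x hx => hfresh x (hmemt x hx))]
      have : pvEmR d0 (ip :: t) = pvEmR d0 t := by
        simp [pvEmR, List.flatMap_cons, Bool.eq_false_iff.mpr hc]
      rw [this]

lemma pvInsertBy_congr {α κ : Type} [LinearOrder κ] (k1 k2 : α → κ) (x : α) (acc : List α)
    (hx : k1 x = k2 x) (hacc : ∀ y ∈ acc, k1 y = k2 y) :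
    PySem.List.insertBy (fun a b => decide (k1 a < k1 b)) x acc
      = PySem.List.insertBy (fun a b => decide (k2 a < k2 b)) x acc := by
  induction acc with
  | nil => rfl
  | cons y t ih =>
    have hy : k1 y = k2 y := hacc y (by simp)
    have ht : ∀ z ∈ t, k1 z = k2 z := fun z hz => hacc z (by simp [hz])
    simp only [PySem.List.insertBy, hx, hy]
    by_cases h : k2 x < k2 y
    · simp [h]
    · simp [h, ih ht]

lemma pvSortedCongr {α κ : Type} [LinearOrder κ] (xs : List α) (k1 k2 : α → κ)
    (h : ∀ x ∈ xs, k1 x = k2 x) :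
    PySem.List.sorted xs k1 false = PySem.List.sorted xs k2 false := by
  rw [PySem.List.sorted_eq_foldl_insertBy, PySem.List.sorted_eq_foldl_insertBy]
  have : ∀ (l : List α) (acc : List α), (∀ x ∈ l, k1 x = k2 x) → (∀ x ∈ acc, k1 x = k2 x) →
      l.foldl (fun acc x => PySem.List.insertBy (fun a b => decide (k1 a < k1 b)) x acc) acc
        = l.foldl (fun acc x => PySem.List.insertBy (fun a b => decide (k2 a < k2 b)) x acc) acc := by
    intro l
    induction l with
    | nil => intro acc _ _; rfl
    | cons x t ih =>
      intro acc hl hacc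
      rw [List.foldl_cons, List.foldl_cons]
      rw [pvInsertBy_congr k1 k2 x acc (hl x (by simp)) hacc]
      apply ih _ (fun z hz => hl z (by simp [hz]))
      intro z hz
      rcases (PySem.List.mem_insertBy _ _ _ _).mp hz with h1 | h1
      · rw [h1]; exact hl x (by simp)
      · exact hacc z h1
  exact this xs [] h (by simp)

lemma pvInsertBy_snd (f : String → Int) (x : Int × String) (acc : List (Int × String))
    (h : ∀ q ∈ acc, q.1 < x.1) :
    (PySem.List.insertBy (fun a b => decide ((toLex (f a.2, a.1) : Lex (Int × Int)) < toLex (f b.2, b.1))) x acc).map (·.2)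
      = PySem.List.insertBy (fun a b => decide (f a < f b)) x.2 (acc.map (·.2)) := by
  induction acc with
  | nil => rfl
  | cons y t ih =>
    have hy : y.1 < x.1 := h y (by simp)
    have hcmp : ((toLex (f x.2, x.1) : Lex (Int × Int)) < toLex (f y.2, y.1)) ↔ f x.2 < f y.2 := by
      rw [Prod.Lex.lt_iff]
      constructor
      · rintro (h1 | ⟨h1, h2⟩)
        · exact h1
        · exfalso; simp at h2; omega
      · intro h1; exact Or.inl h1
    simp only [PySem.List.insertBy, List.map_cons]
    by_cases hlt : f x.2 < f y.2
    · simp [hcmp, hlt]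
    · simp only [show decide ((toLex (f x.2, x.1) : Lex (Int × Int)) < toLex (f y.2, y.1)) = false by
        simp [hcmp, hlt], show decide (f x.2 < f y.2) = false by simp [hlt]]
      simp only [Bool.false_eq_true, if_false, List.map_cons]
      rw [ih (fun q hq => h q (by simp [hq]))]

lemma pvStable (f : String → Int) (l : List (Int × String))
    (hl : l.Pairwise (fun p q => p.1 < q.1)) :
    (PySem.List.sorted l (fun p => (toLex (f p.2, p.1) : Lex (Int × Int))) false).map (·.2)
      = PySem.List.sorted (l.map (·.2)) f false := by
  rw [PySem.List.sorted_eq_foldl_insertBy, PySem.List.sorted_eq_foldl_insertBy]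
  have main : ∀ (l : List (Int × String)) (acc : List (Int × String)),
      l.Pairwise (fun p q => p.1 < q.1) →
      (∀ q ∈ acc, ∀ p ∈ l, q.1 < p.1) →
      (l.foldl (fun acc x => PySem.List.insertBy
          (fun a b => decide ((toLex (f a.2, a.1) : Lex (Int × Int)) < toLex (f b.2, b.1))) x acc) acc).map (·.2)
        = (l.map (·.2)).foldl (fun acc x => PySem.List.insertBy (fun a b => decide (f a < f b)) x acc) (acc.map (·.2)) := by
    intro l
    induction l with
    | nil => intro acc _ _; rfl
    | cons x t ih =>
      intro acc hp hacc
      rw [List.pairwise_cons] at hp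
      rw [List.foldl_cons, List.map_cons, List.foldl_cons]
      rw [← pvInsertBy_snd f x acc (fun q hq => hacc q hq x (by simp))]
      apply ih _ hp.2
      intro q hq p hpt
      rcases (PySem.List.mem_insertBy _ _ _ _).mp hq with h1 | h1
      · rw [h1]; exact hp.1 p hpt
      · exact hacc q h1 p (by simp [hpt])
  exact main l [] hl (by simp)

def pvRank (d : PySem.Dict String Int) : PySem.Dict String Int :=
  (PySem.List.enumerate FIGURES_PAIRS 0).foldl
    (fun r ip => if pvCond d ip.2 then (r.insert ip.2.1 (2 * ip.1)).insert ip.2.2 (2 * ip.1 + 1) else r) ⟨[]⟩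

def pvKey (d : PySem.Dict String Int) (item : Int × String) : Lex (Int × Lex (Int × Int)) :=
  match (pvRank d).get? item.2 with
  | some rk => toLex (0, toLex (rk, 0))
  | none => toLex (1, toLex (d.getD item.2 0, item.1))

set_option maxHeartbeats 1000000 in
lemma pvCentral (d0 : PySem.Dict String Int) (hnd : d0.keys.Nodup) :
    (FIGURES_PAIRS.foldl pvStep ([], d0)).1
      ++ PySem.List.sorted (FIGURES_PAIRS.foldl pvStep ([], d0)).2.keys
           (fun k => (FIGURES_PAIRS.foldl pvStep ([], d0)).2.getD k 0) false
    = (PySem.List.sorted (PySem.List.enumerate d0.keys 0) (pvKey d0) false).map (·.2) := by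
  have hFP : (pvIds FIGURES_PAIRS).Nodup := by decide
  set dd := d0.keys with hdd
  set em := pvEm d0 FIGURES_PAIRS with hem
  set emR := pvEmR d0 (PySem.List.enumerate FIGURES_PAIRS 0) with hemR
  set f : String → Int := fun k => d0.getD k 0 with hf
  -- A side
  have hA : FIGURES_PAIRS.foldl pvStep ([], d0)
      = (em, ⟨d0.items.filter (fun kv => !em.contains kv.1)⟩) := by
    have := pvPairLoop d0 FIGURES_PAIRS [] d0 hFP (fun _ _ => rfl)
    simpa using this
  -- rank facts
  have hrank_items : (pvRank d0).items = emR := by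
    have h1 : (pvIds ((PySem.List.enumerate FIGURES_PAIRS 0).map (·.2))).Nodup := by
      rw [PySem.List.map_snd_enumerate]; exact hFP
    have := pvRankLoop d0 (PySem.List.enumerate FIGURES_PAIRS 0) ⟨[]⟩ h1 (fun _ _ => rfl)
    simpa [pvRank] using this
  have hemfst : emR.map Prod.fst = em := by
    rw [hemR, pvEmR_map_fst, PySem.List.map_snd_enumerate, hem]
  have hrank_keys : (pvRank d0).keys = em := by
    show (pvRank d0).items.map (·.1) = em
    rw [hrank_items]; exact hemfst
  have hem_nodup : em.Nodup := (pvEm_sublist d0 FIGURES_PAIRS).nodup hFP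
  have hrank_nodup : (pvRank d0).keys.Nodup := by rw [hrank_keys]; exact hem_nodup
  have hget_some : ∀ pr ∈ emR, (pvRank d0).get? pr.1 = some pr.2 := by
    intro pr hpr
    exact PySem.Dict.get?_of_mem_items _ (by rw [hrank_items]; exact (by simpa using hpr)) hrank_nodup
  have hget_none : ∀ x, x ∉ em → (pvRank d0).get? x = none := by
    intro x hx
    rw [PySem.Dict.get?_eq_none_iff_not_mem_keys, hrank_keys]; exact hx
  have hmem_em_dd : ∀ x ∈ em, x ∈ dd := by
    intro x hx
    have := pvMem_pvEm d0 FIGURES_PAIRS x hx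
    by_contra hnot
    rw [← PySem.Dict.get?_eq_none_iff_not_mem_keys] at hnot
    simp [hnot] at this
  -- enumerate as a map
  have hE : PySem.List.enumerate dd 0 = dd.map (fun fid => (pvIdx dd fid, fid)) :=
    pvEnum_eq_map dd hnd
  -- the two halves of B's sort
  set attach := fun fid => (pvIdx dd fid, fid) with hattach
  set ysP := em.map attach with hysP
  set c : Int × String → Bool := fun q => em.contains q.2 with hc
  set ysR := PySem.List.sorted ((PySem.List.enumerate dd 0).filter (fun q => !c q))
      (fun p => (toLex (f p.2, p.1) : Lex (Int × Int))) false with hysR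
  have hfilter_comm : ∀ p : String → Bool,
      (PySem.List.enumerate dd 0).filter (fun q => p q.2) = (dd.filter p).map attach := by
    intro p
    rw [hE, List.filter_map]
    rfl
  -- permutation
  have hpermP : ysP.Perm ((PySem.List.enumerate dd 0).filter c) := by
    have h1 : em.Perm (dd.filter (fun k => em.contains k)) := by
      rw [List.perm_ext_iff_of_nodup hem_nodup (hnd.filter _)]
      intro a
      constructor
      · intro ha
        rw [List.mem_filter]
        exact ⟨hmem_em_dd a ha, List.contains_iff_mem.mpr ha⟩
      · intro ha
        exact List.contains_iff_mem.mp (List.mem_filter.mp ha).2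
    have h2 := h1.map attach
    rw [show ((PySem.List.enumerate dd 0).filter c) = ((dd.filter (fun k => em.contains k)).map attach)
        from hfilter_comm _]
    exact h2
  have hpermR : ysR.Perm ((PySem.List.enumerate dd 0).filter (fun q => !c q)) :=
    PySem.List.sorted_perm _ _ _
  have hperm : (ysP ++ ysR).Perm (PySem.List.enumerate dd 0) :=
    (hpermP.append hpermR).trans (List.filter_append_perm c _)
  -- key values
  have hkeyP : ∀ pr ∈ emR, pvKey d0 (attach pr.1) = toLex (0, toLex (pr.2, 0)) := by
    intro pr hpr
    show pvKey d0 (pvIdx dd pr.1, pr.1) = _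
    unfold pvKey
    rw [hget_some pr hpr]
  have hkeyR : ∀ q : Int × String, q.2 ∉ em → pvKey d0 q = toLex (1, toLex (f q.2, q.1)) := by
    intro q hq
    unfold pvKey
    rw [hget_none q.2 hq]
  have hmem_emR_em : ∀ pr ∈ emR, pr.1 ∈ em := by
    intro pr hpr
    rw [← hemfst]
    exact List.mem_map_of_mem hpr
  -- pairwise
  have hpwP : ysP.Pairwise (fun a b => pvKey d0 a < pvKey d0 b) := by
    have hys : ysP = emR.map (fun pr => attach pr.1) := by
      rw [hysP, ← hemfst, List.map_map]
      rfl
    rw [hys, List.pairwise_map]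
    have hbase : emR.Pairwise (fun a b => a.2 < b.2) :=
      pvEmR_pairwise d0 _ (PySem.List.pairwise_lt_enumerate _ _)
    refine hbase.imp_of_mem ?_
    intro a b ha hb hlt
    rw [hkeyP a ha, hkeyP b hb]
    rw [Prod.Lex.lt_iff]
    right
    refine ⟨rfl, ?_⟩
    rw [Prod.Lex.lt_iff]
    left
    exact hlt
  have hmemR_not_em : ∀ q ∈ ysR, q.2 ∉ em := by
    intro q hq
    have := hpermR.subset hq
    rw [List.mem_filter] at this
    have h2 := this.2
    simp only [hc, Bool.not_eq_true'] at h2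
    intro hmem
    rw [List.contains_iff_mem.mpr hmem] at h2
    cases h2
  have hpwR : ysR.Pairwise (fun a b => pvKey d0 a < pvKey d0 b) := by
    have hle : ysR.Pairwise (fun a b =>
        (toLex (f a.2, a.1) : Lex (Int × Int)) ≤ toLex (f b.2, b.1)) := by
      exact PySem.List.sorted_pairwise _ _
    have hfst : ysR.Pairwise (fun a b => a.1 ≠ b.1) := by
      have h1 : ((PySem.List.enumerate dd 0).filter (fun q => !c q)).Pairwise
          (fun p q => p.1 < q.1) :=
        (PySem.List.pairwise_lt_enumerate _ _).filter _
      have h2 : (((PySem.List.enumerate dd 0).filter (fun q => !c q)).map Prod.fst).Nodup := by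
        have := List.pairwise_map.mpr h1
        exact (this.imp (fun h => ne_of_lt h) : List.Pairwise (· ≠ ·) _)
      have h3 : (ysR.map Prod.fst).Nodup := ((hpermR.map Prod.fst).nodup_iff).mpr h2
      exact List.pairwise_map.mp h3
    refine (hle.and hfst).imp_of_mem ?_
    intro a b ha hb hab
    rw [hkeyR a (hmemR_not_em a ha), hkeyR b (hmemR_not_em b hb)]
    rw [Prod.Lex.lt_iff]
    right
    refine ⟨rfl, ?_⟩
    rcases Prod.Lex.le_iff.mp hab.1 with h1 | ⟨h1, h2⟩
    · rw [Prod.Lex.lt_iff]; left; exact h1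
    · rw [Prod.Lex.lt_iff]; right
      exact ⟨h1, lt_of_le_of_ne h2 (by simpa using hab.2)⟩
  have hcross : ∀ a ∈ ysP, ∀ b ∈ ysR, pvKey d0 a < pvKey d0 b := by
    intro a ha b hb
    obtain ⟨fid, hfid, rfl⟩ := List.mem_map.mp ha
    obtain ⟨pr, hpr, hprfid⟩ := List.mem_map.mp (show fid ∈ emR.map Prod.fst by
      rw [hemfst]; exact hfid)
    have hkey_a : pvKey d0 (attach fid) = toLex (0, toLex (pr.2, 0)) := by
      rw [← hprfid]; exact hkeyP pr hpr
    rw [hkey_a, hkeyR b (hmemR_not_em b hb), Prod.Lex.lt_iff]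
    left
    norm_num
  have hsorted : PySem.List.sorted (PySem.List.enumerate dd 0) (pvKey d0) false = ysP ++ ysR :=
    PySem.List.sorted_eq_of_perm_of_pairwise_lt _ _ _ hperm
      (List.pairwise_append.mpr ⟨hpwP, hpwR, hcross⟩)
  -- assemble
  rw [hA, hsorted]
  have hkeysD' : (PySem.Dict.mk (d0.items.filter (fun kv => !em.contains kv.1))).keys
      = dd.filter (fun k => !em.contains k) := by
    show (d0.items.filter (fun kv => !em.contains kv.1)).map (·.1) = _
    exact pvMapFst_filter d0.items (fun k => !em.contains k)
  have hgetD' : ∀ k ∈ dd.filter (fun k => !em.contains k),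
      (PySem.Dict.mk (d0.items.filter (fun kv => !em.contains kv.1))).getD k 0 = f k := by
    intro k hk
    have hknot : (!em.contains k) = true := (List.mem_filter.mp hk).2
    have : PySem.Dict.get? (PySem.Dict.mk (d0.items.filter (fun kv => !em.contains kv.1))) k
        = PySem.Dict.get? d0 k :=
      pvGet?_filter d0.items _ k (fun kv hkv => by rw [hkv]; exact hknot)
    show (PySem.Dict.get? _ k).getD 0 = (PySem.Dict.get? d0 k).getD 0
    rw [this]
  have hAsort : PySem.List.sorted (PySem.Dict.mk (d0.items.filter (fun kv => !em.contains kv.1))).keys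
        (fun k => (PySem.Dict.mk (d0.items.filter (fun kv => !em.contains kv.1))).getD k 0) false
      = PySem.List.sorted (dd.filter (fun k => !em.contains k)) f false := by
    rw [hkeysD']
    exact pvSortedCongr _ _ _ hgetD'
  have hfpair : ((PySem.List.enumerate dd 0).filter (fun q => !c q)).Pairwise
      (fun p q => p.1 < q.1) := (PySem.List.pairwise_lt_enumerate _ _).filter _
  have hsndmap : ((PySem.List.enumerate dd 0).filter (fun q => !c q)).map (·.2)
      = dd.filter (fun k => !em.contains k) := by
    have hbase : ((PySem.List.enumerate dd 0).filter (fun q => !c q))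
        = (dd.filter (fun k => !em.contains k)).map attach :=
      hfilter_comm (fun k => !em.contains k)
    rw [hbase, List.map_map]
    simp [hattach, Function.comp_def]
  have hysR_snd : ysR.map (·.2) = PySem.List.sorted (dd.filter (fun k => !em.contains k)) f false := by
    rw [hysR, pvStable f _ hfpair, hsndmap]
  have hysP_snd : ysP.map (·.2) = em := by
    rw [hysP, List.map_map]
    simp [hattach, Function.comp_def]
  rw [List.map_append, hysP_snd, hysR_snd, hAsort]

theorem pvMain (figures_styles : List (String × List (String × Int))) (figs_ids : List String) :
    order_figures figures_styles figs_ids = order_figures_alt figures_styles figs_ids := by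
  unfold order_figures order_figures_alt
  by_cases h : figs_ids = []
  · rw [if_pos h, if_pos h]
  · rw [if_neg h, if_neg h]
    have hnodup : (figs_ids.foldl (fun d fid =>
        d.insert fid ((get_figure_option figures_styles fid "order").getD 0))
        (⟨[]⟩ : PySem.Dict String Int)).keys.Nodup :=
      PySem.Dict.nodup_keys_foldl_insert _ _ _ List.nodup_nil
    exact pvCentral _ hnodup

-- ===== VERDICT (by name: the statement is the Claim_ definition above) =====
theorem order_figures_spec : Claim_equal_order_figures := by
  intro fs ids _ _
  show order_figures fs ids = order_figures_alt fs ids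
  exact pvMain fs ids
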